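-- pv_equiv track=rewrite | github.com/HitLuca/NLP1-Image_Captioning | dataset_preprocessing.py | calculate_word_indexes
-- ===== SOURCE A (Python) =====
-- def calculate_word_indexes(train_captions, val_captions):
--     indexes = {}
--
--     indexes['</SPAN>'] = 0
--     curr_index = 1
--
--     for i in range(len(train_captions)):
--         captions = train_captions[i]
--         for caption in captions:
--             for word in caption:
--                 if word not in indexes.keys():
--                     indexes[word] = curr_index
--                     curr_index += 1
--
--     for i in range(len(val_captions)):
--         captions = val_captions[i]
--         for caption in captions:
--             for word in caption:
--                 if word not in indexes.keys():
--                     indexes[word] = curr_index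
--                     curr_index += 1
--     return indexes
-- ===== SOURCE B (Python) =====
-- def calculate_word_indexes(train_captions, val_captions):
--     words = ['</SPAN>'] \
--         + [word for captions in train_captions for caption in captions for word in caption] \
--         + [word for captions in val_captions for caption in captions for word in caption]
--     # backward overwrite pass: the surviving value for each word is its FIRST position
--     first = {}
--     for pos, word in reversed(list(enumerate(words))):
--         first[word] = pos
--     # sort the distinct words by first-occurrence position, then rank them
--     ordered = sorted(first.items(), key=lambda item: item[1])
--     return {word: rank for rank, (word, _) in enumerate(ordered)}
-- ===== Notes on version B (the rewrite author's own statement) =====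
-- stated objective: alternative
-- what changed: Replaces A's single interleaved pass (membership test + running counter) with a sort-based algorithm: flatten the words ('</SPAN>' first), compute each word's first-occurrence position by one backward overwrite pass over the enumerated words, sort the distinct words by that position, and rank them with enumerate.
import Mathlib
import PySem

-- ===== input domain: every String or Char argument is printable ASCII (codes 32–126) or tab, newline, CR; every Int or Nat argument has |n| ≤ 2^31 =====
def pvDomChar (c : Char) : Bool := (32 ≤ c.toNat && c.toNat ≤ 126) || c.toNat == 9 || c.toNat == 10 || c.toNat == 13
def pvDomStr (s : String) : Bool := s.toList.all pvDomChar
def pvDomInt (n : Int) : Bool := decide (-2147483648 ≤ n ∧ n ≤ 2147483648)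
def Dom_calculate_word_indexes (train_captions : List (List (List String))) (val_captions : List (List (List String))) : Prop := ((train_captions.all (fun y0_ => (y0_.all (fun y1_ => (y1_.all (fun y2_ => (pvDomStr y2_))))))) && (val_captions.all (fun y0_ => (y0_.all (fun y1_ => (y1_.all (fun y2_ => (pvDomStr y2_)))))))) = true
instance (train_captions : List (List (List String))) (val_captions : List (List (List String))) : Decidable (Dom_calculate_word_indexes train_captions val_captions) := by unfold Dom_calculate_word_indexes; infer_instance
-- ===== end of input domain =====

-- B replaces A's one-pass counter/membership build by a sort-based algorithm: flatten the
-- words ('</SPAN>' first), find each word's first position by a BACKWARD overwrite pass,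
-- sort the distinct words by that position, and rank them (alternative decomposition).


-- ===== PORT A =====
-- one word step of A's inner loop: 'if word not in indexes.keys(): indexes[word] = curr_index; curr_index += 1'
def pvStepA (s : PySem.Dict String Int × Int) (word : String) : PySem.Dict String Int × Int :=
  if s.1.contains word then s else (s.1.insert word s.2, s.2 + 1)

-- 'for i in range(len(caps)): captions = caps[i]; for caption in captions: for word in caption: …'
def pvLoopA (caps : List (List (List String))) (s : PySem.Dict String Int × Int) :
    PySem.Dict String Int × Int :=
  caps.foldl (fun s captions =>
    captions.foldl (fun s caption =>
      caption.foldl pvStepA s) s) s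

def calculate_word_indexes (train_captions : List (List (List String))) (val_captions : List (List (List String))) : List (String × Int) :=
  let indexes : PySem.Dict String Int := PySem.Dict.empty.insert "</SPAN>" 0
  let s1 := pvLoopA train_captions (indexes, 1)
  let s2 := pvLoopA val_captions s1
  s2.1.items

-- ===== PORT B =====
-- words = ['</SPAN>'] + [word for … train …] + [word for … val …]
def pvWordsB (train_captions val_captions : List (List (List String))) : List String :=
  "</SPAN>" :: (train_captions.flatMap (fun captions => captions.flatMap (fun caption => caption))
    ++ val_captions.flatMap (fun captions => captions.flatMap (fun caption => caption)))

def calculate_word_indexes_alt (train_captions : List (List (List String))) (val_captions : List (List (List String))) : List (String × Int) :=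
  let words := pvWordsB train_captions val_captions
  -- for pos, word in reversed(list(enumerate(words))): first[word] = pos
  let first := (PySem.List.enumerate words 0).reverse.foldl
      (fun (d : PySem.Dict String Int) p => d.insert p.2 p.1) PySem.Dict.empty
  -- ordered = sorted(first.items(), key=lambda item: item[1])
  let ordered := PySem.List.sorted first.items (fun item => item.2) false
  -- {word: rank for rank, (word, _) in enumerate(ordered)}
  (PySem.List.enumerate ordered 0).map (fun q => (q.2.1, q.1))

-- ===== PRECONDITION & SPEC =====
def Spec_calculate_word_indexes (train_captions : List (List (List String))) (val_captions : List (List (List String))) (out : List (String × Int)) : Prop := out = calculate_word_indexes_alt train_captions val_captions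
instance (train_captions : List (List (List String))) (val_captions : List (List (List String))) (out : List (String × Int)) : Decidable (Spec_calculate_word_indexes train_captions val_captions out) := by unfold Spec_calculate_word_indexes; infer_instance

-- ===== CLAIM (what is proved, stated in full; the proofs are below) =====
def Claim_equal_calculate_word_indexes : Prop := ∀ (train_captions : List (List (List String))) (val_captions : List (List (List String))), Dom_calculate_word_indexes train_captions val_captions → Spec_calculate_word_indexes train_captions val_captions (calculate_word_indexes train_captions val_captions)

-- ===== LEMMAS AND PROOFS =====

-- first-occurrence index of w in ws (Nat)
def pvFst (ws : List String) (w : String) : Nat := (PySem.List.index? ws w).getD 0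

-- canonical result: the dedup (first appearances, in order), each word paired with its index
-- ### A-side: the dict that maps the k-th key of ks to k
def pvDictOf (ks : List String) : PySem.Dict String Int :=
  PySem.Dict.mk ((PySem.List.enumerate ks 0).map (fun p => (p.2, p.1)))

theorem pvDictOf_keys (ks : List String) : (pvDictOf ks).keys = ks := by
  simp only [pvDictOf, PySem.Dict.keys, List.map_map]
  exact PySem.List.map_snd_enumerate ks 0

theorem pvDictOf_contains (ks : List String) (w : String) :
    (pvDictOf ks).contains w = decide (w ∈ ks) := by
  rw [PySem.Dict.contains_eq_decide_mem_keys, pvDictOf_keys]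

theorem pvDictOf_snoc (ks : List String) (w : String) (hw : w ∉ ks) :
    (pvDictOf ks).insert w (ks.length : Int) = pvDictOf (ks ++ [w]) := by
  apply PySem.Dict.ext
  rw [PySem.Dict.items_insert_of_not_contains]
  · simp [pvDictOf, PySem.List.enumerate_append]
  · rw [pvDictOf_contains]; simp [hw]

-- A's word loop, started from the dict of key list ks, computes the dict of ks.update(words)
theorem pvStepA_invariant (ws : List String) (ks : List String) :
    ws.foldl pvStepA (pvDictOf ks, (ks.length : Int))
      = (pvDictOf (PySem.Set.update ks ws), ((PySem.Set.update ks ws).length : Int)) := by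
  induction ws generalizing ks with
  | nil => simp [PySem.Set.update]
  | cons w ws ih =>
    rw [List.foldl_cons, PySem.Set.update_cons]
    by_cases hw : w ∈ ks
    · rw [PySem.Set.add_of_mem hw]
      have hstep : pvStepA (pvDictOf ks, (ks.length : Int)) w = (pvDictOf ks, (ks.length : Int)) := by
        simp [pvStepA, pvDictOf_contains, hw]
      rw [hstep, ih]
    · rw [PySem.Set.add_of_not_mem hw]
      have hstep : pvStepA (pvDictOf ks, (ks.length : Int)) w
          = (pvDictOf (ks ++ [w]), ((ks ++ [w]).length : Int)) := by
        simp [pvStepA, pvDictOf_contains, hw, pvDictOf_snoc ks w hw]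
      rw [hstep, ih]

-- A's triple loop is the single-word-list fold over the flattening
theorem pvLoopA_flatten (caps : List (List (List String))) (s : PySem.Dict String Int × Int) :
    pvLoopA caps s = (caps.flatMap (fun captions => captions.flatMap (fun caption => caption))).foldl pvStepA s := by
  induction caps generalizing s with
  | nil => rfl
  | cons c cs ih =>
    rw [List.flatMap_cons, List.foldl_append, pvLoopA, List.foldl_cons, ← pvLoopA, ih]
    congr 1
    induction c generalizing s with
    | nil => rfl
    | cons cap caps ih2 =>
      rw [List.flatMap_cons, List.foldl_append, List.foldl_cons, ih2]

theorem pvDictOf_span : pvDictOf ["</SPAN>"] = PySem.Dict.empty.insert "</SPAN>" 0 := by decide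

-- ### B-side lemmas
theorem pvIndex?_eq_some (ws : List String) (w : String) (hw : w ∈ ws) :
    PySem.List.index? ws w = some (pvFst ws w) := by
  obtain ⟨k, hk⟩ := Option.isSome_iff_exists.mp ((PySem.List.index?_isSome_iff ws w).mpr hw)
  unfold pvFst
  rw [hk]
  rfl

theorem pvFst_cons_self (w : String) (xs : List String) : pvFst (w :: xs) w = 0 := by
  unfold pvFst
  rw [PySem.List.index?_cons_self]
  rfl

theorem pvFst_cons_of_ne (x w : String) (xs : List String) (hx : x ≠ w) (hw : w ∈ xs) :
    pvFst (x :: xs) w = pvFst xs w + 1 := by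
  unfold pvFst
  rw [PySem.List.index?_cons_of_ne xs hx, pvIndex?_eq_some xs w hw]
  rfl

-- lookup in the backward-insert fold: the LAST inserted value for k wins
theorem pvGet_foldl_insert (l : List (Int × String)) (d : PySem.Dict String Int) (k : String) :
    (l.foldl (fun d p => d.insert p.2 p.1) d).get? k
      = (match l.reverse.find? (fun p => p.2 == k) with
         | some p => some p.1
         | none => d.get? k) := by
  induction l generalizing d with
  | nil => simp
  | cons p l ih =>
    rw [List.foldl_cons, ih, List.reverse_cons, List.find?_append]
    cases h : l.reverse.find? (fun p => p.2 == k) with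
    | some q => simp
    | none =>
      by_cases hk : p.2 = k
      · subst hk
        simp [PySem.Dict.get?_insert_self]
      · simp [hk, PySem.Dict.get?_insert_of_ne d p.1 (Ne.symm hk)]

-- the first pair of enumerate whose word is w sits at w's first-occurrence index
theorem pvFind_enumerate (ws : List String) (s : Int) (w : String) (hw : w ∈ ws) :
    (PySem.List.enumerate ws s).find? (fun p => p.2 == w) = some (s + (pvFst ws w : Int), w) := by
  induction ws generalizing s with
  | nil => cases hw
  | cons x xs ih =>
    rw [PySem.List.enumerate_cons]
    by_cases hx : x = w
    · subst hx
      rw [List.find?_cons_of_pos (by simp), pvFst_cons_self]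
      simp
    · have hw' : w ∈ xs := by cases hw with
        | head => exact absurd rfl hx
        | tail _ h => exact h
      rw [List.find?_cons_of_neg (by simp [hx]), ih (s + 1) hw', pvFst_cons_of_ne x w xs hx hw']
      simp only [Option.some.injEq, Prod.mk.injEq, and_true]
      push_cast
      ring

-- first-occurrence indices are bounded by the length
theorem pvFst_lt_length (ws : List String) (w : String) (hw : w ∈ ws) :
    pvFst ws w < ws.length := by
  obtain ⟨hlt, -, -⟩ := PySem.List.getElem_of_index?_eq_some (pvIndex?_eq_some ws w hw)
  exact hlt

-- first occurrence is stable under appending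
theorem pvFst_append (ws t : List String) (w : String) (hw : w ∈ ws) :
    pvFst (ws ++ t) w = pvFst ws w := by
  unfold pvFst
  rw [PySem.List.index?_append_of_mem t hw]

-- the dedup list is ordered by first occurrence
theorem pvPairwise_fst (ws : List String) :
    (PySem.Set.ofList ws).Pairwise (fun a b => pvFst ws a < pvFst ws b) := by
  induction ws using List.reverseRecOn with
  | nil => simp [PySem.Set.ofList_nil]
  | append_singleton xs x ih =>
    rw [PySem.Set.ofList_append_singleton]
    by_cases hx : x ∈ xs
    · rw [PySem.Set.add_of_mem ((PySem.Set.mem_ofList xs x).mpr hx)]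
      refine ih.imp_of_mem ?_
      intro a b ha hb hab
      rw [pvFst_append xs [x] a ((PySem.Set.mem_ofList xs a).mp ha),
          pvFst_append xs [x] b ((PySem.Set.mem_ofList xs b).mp hb)]
      exact hab
    · rw [PySem.Set.add_of_not_mem (fun hc => hx ((PySem.Set.mem_ofList xs x).mp hc)), List.pairwise_append]
      refine ⟨?_, by simp, ?_⟩
      · refine ih.imp_of_mem ?_
        intro a b ha hb hab
        rw [pvFst_append xs [x] a ((PySem.Set.mem_ofList xs a).mp ha),
            pvFst_append xs [x] b ((PySem.Set.mem_ofList xs b).mp hb)]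
        exact hab
      · intro a ha b hb
        rw [List.mem_singleton] at hb
        subst hb
        have ha' := (PySem.Set.mem_ofList xs a).mp ha
        rw [pvFst_append xs [b] a ha']
        have hb' : pvFst (xs ++ [b]) b = xs.length := by
          unfold pvFst
          rw [PySem.List.index?_append_singleton_self xs b hx]
          rfl
        rw [hb']
        exact pvFst_lt_length xs a ha'

-- enumerate of a mapped list
theorem pvEnumerate_map {α β : Type} (l : List α) (f : α → β) (s : Int) :
    PySem.List.enumerate (l.map f) s = (PySem.List.enumerate l s).map (fun p => (p.1, f p.2)) := by
  induction l generalizing s with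
  | nil => simp
  | cons x xs ih => simp [PySem.List.enumerate_cons, ih]

-- the sorted stage of B produces the dedup list, paired with first-occurrence positions
theorem pvSorted_eq (ws : List String) :
    PySem.List.sorted
      (((PySem.List.enumerate ws 0).reverse.foldl
          (fun (d : PySem.Dict String Int) p => d.insert p.2 p.1) PySem.Dict.empty).items)
      (fun item => item.2) false
    = (PySem.Set.ofList ws).map (fun w => (w, (pvFst ws w : Int))) := by
  set first := (PySem.List.enumerate ws 0).reverse.foldl
      (fun (d : PySem.Dict String Int) p => d.insert p.2 p.1) PySem.Dict.empty with hfirst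
  have hnd : first.keys.Nodup := by
    rw [hfirst]
    exact PySem.Dict.nodup_keys_foldl_insert_key _ (fun (p : Int × String) => p.2)
      (fun _ p => p.1) _ PySem.Dict.nodup_keys_empty
  have hkeys : first.keys = PySem.Set.ofList ws.reverse := by
    rw [hfirst,
      PySem.Dict.keys_foldl_insert_key _ (fun (p : Int × String) => p.2) (fun _ p => p.1),
      PySem.Dict.keys_empty, PySem.Set.update_nil_left, List.map_reverse,
      PySem.List.map_snd_enumerate]
  have hget : ∀ w ∈ ws, first.get? w = some (pvFst ws w : Int) := by
    intro w hw
    rw [hfirst, pvGet_foldl_insert, List.reverse_reverse, pvFind_enumerate ws 0 w hw]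
    simp
  have hitems : first.items = (PySem.Set.ofList ws.reverse).map (fun w => (w, (pvFst ws w : Int))) := by
    rw [PySem.Dict.items_eq_map_keys first hnd 0, hkeys]
    apply List.map_congr_left
    intro w hw
    have hw' : w ∈ ws := List.mem_reverse.mp ((PySem.Set.mem_ofList ws.reverse w).mp hw)
    rw [PySem.Dict.getD_eq_get?_getD, hget w hw']
    rfl
  apply PySem.List.sorted_eq_of_perm_of_pairwise_lt
  · rw [hitems]
    apply List.Perm.map
    apply (List.perm_ext_iff_of_nodup (PySem.Set.nodup_ofList ws) (PySem.Set.nodup_ofList ws.reverse)).mpr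
    intro a
    rw [PySem.Set.mem_ofList, PySem.Set.mem_ofList, List.mem_reverse]
  · rw [List.pairwise_map]
    refine (pvPairwise_fst ws).imp ?_
    intro a b hab
    show (pvFst ws a : Int) < (pvFst ws b : Int)
    exact_mod_cast hab

-- set(['</SPAN>'] then rest) = ['</SPAN>'].update(rest)
theorem pvOfList_cons_span (rest : List String) :
    PySem.Set.ofList ("</SPAN>" :: rest) = PySem.Set.update ["</SPAN>"] rest := by
  rfl

-- ===== VERDICT (by name: the statement is the Claim_ definition above) =====
theorem calculate_word_indexes_spec : Claim_equal_calculate_word_indexes := by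
  intro train val _
  show _ = _
  simp only [calculate_word_indexes, calculate_word_indexes_alt]
  rw [pvLoopA_flatten, pvLoopA_flatten, ← List.foldl_append, ← pvDictOf_span]
  have h1 : (1 : Int) = ((["</SPAN>"].length : Nat) : Int) := by decide
  rw [h1, pvStepA_invariant]
  rw [pvSorted_eq, pvEnumerate_map, List.map_map]
  have h2 : PySem.Set.ofList (pvWordsB train val)
      = PySem.Set.update ["</SPAN>"]
        (train.flatMap (fun captions => captions.flatMap fun caption => caption)
          ++ val.flatMap (fun captions => captions.flatMap fun caption => caption)) := by
    rw [pvWordsB, pvOfList_cons_span]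
  rw [h2]
  rfl
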